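-- pv_equiv track=rewrite | github.com/kh277/BOJ | 백준/Silver/1541. 잃어버린 괄호/잃어버린 괄호.py | solve
-- ===== SOURCE A (Python) =====
-- def solve(expr: str):
--   num = list(map(str, expr.split('-')))
--   result = 0
--
--   # 첫 번째 분할 계산
--   split_1 = list(map(str, num[0].split('+')))
--   for i in split_1:
--     result += int(i)
--
--   # 두 번째 이후 분할
--   if len(num) > 1:
--
--     # 모든 분할에 대해
--     for i in range(1, len(num)):
--       split_2 = list(map(str, num[i].split('+')))
--       temp = 0
--
--       # +로 잘린 숫자를 더하기
--       for j in split_2: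
--         temp += int(j)
--       result -= temp
--
--   return result
-- ===== SOURCE B (Python) =====
-- def solve(expr: str):
--   # single left-to-right scan: no split lists are built; sign turns (and stays)
--   # negative after the first '-'; int() is applied to exactly the same tokens,
--   # in the same order, as A's split('-')/split('+') produces.
--   result = 0
--   neg = False
--   buf = ''
--   for ch in expr:
--     if ch == '+' or ch == '-':
--       v = int(buf)
--       result = result - v if neg else result + v
--       neg = neg or ch == '-'
--       buf = ''
--     else:
--       buf += ch
--   v = int(buf)
--   return result - v if neg else result + v
-- ===== Notes on version B (the rewrite author's own statement) =====
-- stated objective: alternative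
-- what changed: Replaced A's two-level split('-')/split('+') with nested summing loops by a single left-to-right character scan that keeps a digit buffer, a running result and a permanent sign flag flipped at the first '-'.
import Mathlib
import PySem

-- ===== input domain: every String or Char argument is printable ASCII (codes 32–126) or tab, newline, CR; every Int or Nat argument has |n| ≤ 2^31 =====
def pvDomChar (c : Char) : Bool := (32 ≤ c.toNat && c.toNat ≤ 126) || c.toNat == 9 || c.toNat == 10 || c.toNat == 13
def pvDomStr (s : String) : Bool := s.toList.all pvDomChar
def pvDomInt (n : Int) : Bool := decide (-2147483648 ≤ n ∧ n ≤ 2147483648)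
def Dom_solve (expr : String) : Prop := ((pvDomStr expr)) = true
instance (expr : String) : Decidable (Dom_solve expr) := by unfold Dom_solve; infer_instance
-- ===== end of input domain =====

-- B: a single left-to-right character scan with a buffer and a sign flag, replacing A's nested split('-')/split('+') passes (alternative decomposition; no speed claim).

-- ===== PORT A =====
-- port of A: split on '-', sum the '+'-tokens of the first piece, subtract the
-- token sums of the remaining pieces; int(t) is PySem.Int.ofChars? (getD 0 is
-- only reached outside Pre_solve, where Python raises ValueError)
def solve (expr : String) : Int :=
  let num := PySem.Chars.splitOn expr.toList ['-']
  let split1 := PySem.Chars.splitOn (PySem.List.pyGetD num 0 []) ['+']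
  let result := split1.foldl (fun r i => r + (PySem.Int.ofChars? i).getD 0) 0
  if num.length > 1 then
    (PySem.List.pyRange 1 (num.length : Int) 1).foldl
      (fun r i =>
        let split2 := PySem.Chars.splitOn (PySem.List.pyGetD num i []) ['+']
        let temp := split2.foldl (fun t j => t + (PySem.Int.ofChars? j).getD 0) 0
        r - temp) result
  else result

-- ===== PORT B =====
-- one step of B's scan over the state (result, neg, buffer)
def pvStep (st : Int × Bool × List Char) (ch : Char) : Int × Bool × List Char :=
  if ch = '+' ∨ ch = '-' then
    let v := (PySem.Int.ofChars? st.2.2).getD 0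
    (if st.2.1 then st.1 - v else st.1 + v, st.2.1 || decide (ch = '-'), [])
  else (st.1, st.2.1, st.2.2 ++ [ch])

def solve_alt (expr : String) : Int :=
  let st := expr.toList.foldl pvStep (0, false, [])
  let v := (PySem.Int.ofChars? st.2.2).getD 0
  if st.2.1 then st.1 - v else st.1 + v

-- ===== PRECONDITION & SPEC =====
-- Pre_solve: every token (expr split at '-' and then at '+') is a valid Python
-- int literal — exactly the inputs on which A's int() calls all succeed.
def Pre_solve (expr : String) : Prop :=
  ∀ seg ∈ PySem.Chars.splitOn expr.toList ['-'],
    ∀ t ∈ PySem.Chars.splitOn seg ['+'], (PySem.Int.ofChars? t).isSome = true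
instance (expr : String) : Decidable (Pre_solve expr) := by unfold Pre_solve; infer_instance
def pvWitness_solve : String := "55-50+40"

def Spec_solve (expr : String) (out : Int) : Prop := out = solve_alt expr
instance (expr : String) (out : Int) : Decidable (Spec_solve expr out) := by unfold Spec_solve; infer_instance

-- ===== CLAIM (what is proved, stated in full; the proofs are below) =====
def Claim_equal_solve : Prop := ∀ (expr : String), Dom_solve expr → Pre_solve expr → Spec_solve expr (solve expr)

-- ===== LEMMAS AND PROOFS =====

-- reference splitter: split cs at every char satisfying p (empty pieces kept)
def splitP (p : Char → Bool) : List Char → List (List Char)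
  | [] => [[]]
  | c :: cs =>
    match splitP p cs with
    | [] => []
    | t :: ts => if p c then [] :: t :: ts else (c :: t) :: ts

def pvVal (t : List Char) : Int := (PySem.Int.ofChars? t).getD 0

def pvIsOp (c : Char) : Bool := c = '+' || c = '-'

-- A's value, expressed over the reference splitter
def pvSum (seg : List Char) : Int := ((splitP (· = '+') seg).map pvVal).sum
def pvAval (cs : List Char) : Int :=
  match splitP (· = '-') cs with
  | [] => 0
  | s0 :: rest => pvSum s0 - ((rest.map pvSum).sum)
def pvNsum (cs : List Char) : Int := ((splitP pvIsOp cs).map pvVal).sum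

lemma splitP_ne_nil (p : Char → Bool) (cs : List Char) : splitP p cs ≠ [] := by
  induction cs with
  | nil => simp [splitP]
  | cons c cs ih =>
    cases h : splitP p cs with
    | nil => exact absurd h ih
    | cons t ts => simp [splitP, h]; split <;> simp

lemma splitP_append (p : Char → Bool) (pre rest : List Char) (hpre : ∀ c ∈ pre, p c = false) :
    splitP p (pre ++ rest) = (splitP p rest).modifyHead (pre ++ ·) := by
  induction pre with
  | nil =>
    cases h : splitP p rest with
    | nil => simp [h]
    | cons t ts => simp [h]
  | cons c pre ih =>
    have hc : p c = false := hpre c (by simp)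
    have hrec := ih (fun d hd => hpre d (by simp [hd]))
    cases h : splitP p rest with
    | nil => exact absurd h (splitP_ne_nil p rest)
    | cons t ts =>
      simp only [List.cons_append, splitP, hrec, h, List.modifyHead, hc]
      simp

lemma splitP_singleton (p : Char → Bool) (pre : List Char) (hpre : ∀ c ∈ pre, p c = false) :
    splitP p pre = [pre] := by
  have := splitP_append p pre [] hpre
  simpa [splitP] using this

lemma splitP_append_op (p : Char → Bool) (pre rest : List Char) (c : Char)
    (hpre : ∀ d ∈ pre, p d = false) (hc : p c = true) :
    splitP p (pre ++ c :: rest) = pre :: splitP p rest := by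
  rw [splitP_append p pre _ hpre]
  cases h : splitP p rest with
  | nil => exact absurd h (splitP_ne_nil p rest)
  | cons t ts => simp [splitP, h, hc]

-- tokensPM = flatMap of the two-level split
lemma splitP_op_eq_flatMap (cs : List Char) :
    splitP pvIsOp cs = (splitP (· = '-') cs).flatMap (splitP (· = '+')) := by
  induction cs with
  | nil => simp [splitP]
  | cons c cs ih =>
    cases h : splitP (· = '-') cs with
    | nil => exact absurd h (splitP_ne_nil _ cs)
    | cons t ts =>
      cases h2 : splitP (· = '+') t with
      | nil => exact absurd h2 (splitP_ne_nil _ t)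
      | cons u us =>
        rw [h] at ih
        simp only [List.flatMap_cons, h2] at ih
        by_cases hm : c = '-'
        · subst hm
          simp [splitP, ih, h, h2, pvIsOp, List.flatMap_cons]
        · by_cases hp : c = '+'
          · subst hp
            simp [splitP, ih, h, h2, pvIsOp, List.flatMap_cons, hm]
          · simp [splitP, ih, h, h2, pvIsOp, List.flatMap_cons, hm, hp]

lemma nsum_eq (cs : List Char) :
    pvNsum cs = ((splitP (· = '-') cs).map pvSum).sum := by
  unfold pvNsum pvSum
  rw [splitP_op_eq_flatMap]
  induction splitP (· = '-') cs with
  | nil => simp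
  | cons t ts ih => simp [List.flatMap_cons, ih]

lemma aval_nil (buf : List Char) (hb : ∀ c ∈ buf, pvIsOp c = false) :
    pvAval buf = pvVal buf := by
  have h1 : splitP (· = '-') buf = [buf] :=
    splitP_singleton _ buf (fun c hc => by have := hb c hc; simp [pvIsOp] at this ⊢; simp [this])
  have h2 : splitP (· = '+') buf = [buf] :=
    splitP_singleton _ buf (fun c hc => by have := hb c hc; simp [pvIsOp] at this ⊢; simp [this])
  simp [pvAval, h1, pvSum, h2]

lemma aval_plus (buf cs : List Char) (hb : ∀ c ∈ buf, pvIsOp c = false) :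
    pvAval (buf ++ '+' :: cs) = pvVal buf + pvAval cs := by
  have hbm : ∀ c ∈ buf, (c = '-' : Bool) = false :=
    fun c hc => by have := hb c hc; simp [pvIsOp] at this ⊢; simp [this]
  have hbp : ∀ c ∈ buf, (c = '+' : Bool) = false :=
    fun c hc => by have := hb c hc; simp [pvIsOp] at this ⊢; simp [this]
  cases h : splitP (· = '-') cs with
  | nil => exact absurd h (splitP_ne_nil _ cs)
  | cons t ts =>
    have : splitP (· = '-') (buf ++ '+' :: cs) = (buf ++ '+' :: t) :: ts := by
      rw [splitP_append _ buf _ hbm]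
      simp [splitP, h]
    have hs : pvSum (buf ++ '+' :: t) = pvVal buf + pvSum t := by
      unfold pvSum
      rw [splitP_append_op _ buf t '+' hbp (by simp)]
      simp
    simp [pvAval, this, h, hs]
    ring

lemma aval_minus (buf cs : List Char) (hb : ∀ c ∈ buf, pvIsOp c = false) :
    pvAval (buf ++ '-' :: cs) = pvVal buf - pvNsum cs := by
  have hbm : ∀ c ∈ buf, (c = '-' : Bool) = false :=
    fun c hc => by have := hb c hc; simp [pvIsOp] at this ⊢; simp [this]
  have hbp : ∀ c ∈ buf, (c = '+' : Bool) = false :=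
    fun c hc => by have := hb c hc; simp [pvIsOp] at this ⊢; simp [this]
  have h1 : splitP (· = '-') (buf ++ '-' :: cs) = buf :: splitP (· = '-') cs :=
    splitP_append_op _ buf cs '-' hbm (by simp)
  have h2 : pvSum buf = pvVal buf := by
    unfold pvSum; rw [splitP_singleton _ buf hbp]; simp
  simp [pvAval, h1, h2, nsum_eq]

lemma nsum_buf (buf : List Char) (hb : ∀ c ∈ buf, pvIsOp c = false) :
    pvNsum buf = pvVal buf := by
  unfold pvNsum; rw [splitP_singleton _ buf hb]; simp

lemma nsum_op (buf cs : List Char) (c : Char) (hb : ∀ d ∈ buf, pvIsOp d = false)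
    (hc : pvIsOp c = true) :
    pvNsum (buf ++ c :: cs) = pvVal buf + pvNsum cs := by
  unfold pvNsum; rw [splitP_append_op _ buf cs c hb hc]; simp

lemma pvOpFree_snoc (buf : List Char) (c : Char)
    (hb : ∀ d ∈ buf, pvIsOp d = false) (hc : pvIsOp c = false) :
    ∀ d ∈ buf ++ [c], pvIsOp d = false := by
  intro d hd
  rcases List.mem_append.1 hd with h | h
  · exact hb d h
  · simp at h; subst h; exact hc

-- finish B's state
def pvFin (st : Int × Bool × List Char) : Int :=
  if st.2.1 then st.1 - (PySem.Int.ofChars? st.2.2).getD 0 else st.1 + (PySem.Int.ofChars? st.2.2).getD 0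

lemma scan_neg (cs : List Char) : ∀ (r : Int) (buf : List Char),
    (∀ c ∈ buf, pvIsOp c = false) →
    pvFin (cs.foldl pvStep (r, true, buf)) = r - pvNsum (buf ++ cs) := by
  induction cs with
  | nil =>
    intro r buf hb
    simp [pvFin, nsum_buf buf hb, pvVal]
  | cons c cs ih =>
    intro r buf hb
    by_cases hop : c = '+' ∨ c = '-'
    · have hop' : pvIsOp c = true := by rcases hop with h | h <;> simp [pvIsOp, h]
      have : pvStep (r, true, buf) c = (r - pvVal buf, true, []) := by
        simp [pvStep, hop, pvVal]
      rw [List.foldl_cons, this, ih _ [] (by simp)]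
      rw [nsum_op buf cs c hb hop']
      ring_nf
      simp
    · have hst : pvStep (r, true, buf) c = (r, true, buf ++ [c]) := by
        simp [pvStep, hop]
      have hcf : pvIsOp c = false := by
        rw [not_or] at hop; simp [pvIsOp, hop.1, hop.2]
      rw [List.foldl_cons, hst, ih r (buf ++ [c]) (pvOpFree_snoc buf c hb hcf)]
      simp

lemma scan_pos (cs : List Char) : ∀ (r : Int) (buf : List Char),
    (∀ c ∈ buf, pvIsOp c = false) →
    pvFin (cs.foldl pvStep (r, false, buf)) = r + pvAval (buf ++ cs) := by
  induction cs with
  | nil =>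
    intro r buf hb
    simp [pvFin, aval_nil buf hb, pvVal]
  | cons c cs ih =>
    intro r buf hb
    by_cases hp : c = '+'
    · subst hp
      have : pvStep (r, false, buf) '+' = (r + pvVal buf, false, []) := by
        simp [pvStep, pvVal]
      rw [List.foldl_cons, this, ih _ [] (by simp), aval_plus buf cs hb]
      simp only [List.nil_append]; ring
    · by_cases hm : c = '-'
      · subst hm
        have : pvStep (r, false, buf) '-' = (r + pvVal buf, true, []) := by
          simp [pvStep, pvVal]
        rw [List.foldl_cons, this, scan_neg cs _ [] (by simp), aval_minus buf cs hb]
        simp only [List.nil_append]; ring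
      · have hst : pvStep (r, false, buf) c = (r, false, buf ++ [c]) := by
          simp [pvStep, hp, hm]
        have hcf : pvIsOp c = false := by simp [pvIsOp, hp, hm]
        rw [List.foldl_cons, hst, ih r (buf ++ [c]) (pvOpFree_snoc buf c hb hcf)]
        simp

-- the PySem splitter specialises to the reference splitter for a one-char separator
lemma splitOn_go_eq (d : Char) : ∀ (fuel : Nat) (l cur : List Char) (acc : List (List Char)),
    l.length ≤ fuel →
    PySem.Chars.splitOn.go [d] fuel l cur acc
      = acc.reverse ++ (splitP (· = d) l).modifyHead (cur.reverse ++ ·) := by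
  intro fuel
  induction fuel with
  | zero =>
    intro l cur acc hl
    have : l = [] := List.length_eq_zero_iff.1 (Nat.le_zero.1 hl)
    subst this
    rw [PySem.Chars.splitOn.go.eq_def]
    simp [splitP]
  | succ n ih =>
    intro l cur acc hl
    cases l with
    | nil =>
      rw [PySem.Chars.splitOn.go.eq_def]
      simp [splitP]
    | cons c rest =>
      have hlen : rest.length ≤ n := by simpa using hl
      cases hsp : splitP (· = d) rest with
      | nil => exact absurd hsp (splitP_ne_nil _ rest)
      | cons t ts =>
        by_cases hc : c = d
        · subst hc
          have hpre : [c].isPrefixOf (c :: rest) = true := by simp [List.isPrefixOf]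
          rw [PySem.Chars.splitOn.go.eq_def]
          show (if [c].isPrefixOf (c :: rest)
            then PySem.Chars.splitOn.go [c] n (List.drop 1 (c :: rest)) [] (cur.reverse :: acc)
            else PySem.Chars.splitOn.go [c] n rest (c :: cur) acc) = _
          rw [if_pos hpre]
          rw [ih (List.drop 1 (c :: rest)) [] (cur.reverse :: acc) (by simpa using hlen)]
          simp [splitP, hsp]
        · have hpre : [d].isPrefixOf (c :: rest) = false := by
            simp [List.isPrefixOf]
            exact fun h => absurd h.symm hc
          rw [PySem.Chars.splitOn.go.eq_def]
          show (if [d].isPrefixOf (c :: rest)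
            then PySem.Chars.splitOn.go [d] n (List.drop 1 (c :: rest)) [] (cur.reverse :: acc)
            else PySem.Chars.splitOn.go [d] n rest (c :: cur) acc) = _
          rw [if_neg (by simp [hpre])]
          rw [ih rest (c :: cur) acc hlen]
          simp [splitP, hsp, hc]

lemma splitOn_eq_splitP (d : Char) (cs : List Char) :
    PySem.Chars.splitOn cs [d] = splitP (· = d) cs := by
  unfold PySem.Chars.splitOn
  rw [splitOn_go_eq d (cs.length + 1) cs [] [] (by omega)]
  cases h : splitP (· = d) cs with
  | nil => exact absurd h (splitP_ne_nil _ cs)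
  | cons t ts => simp

lemma foldl_add_val (l : List (List Char)) (a : Int) :
    l.foldl (fun r i => r + (PySem.Int.ofChars? i).getD 0) a = a + (l.map pvVal).sum := by
  induction l generalizing a with
  | nil => simp
  | cons t ts ih => simp [ih, pvVal]; ring

lemma foldl_sub_sum (l : List (List Char)) (a : Int) :
    l.foldl (fun r seg => r - pvSum seg) a = a - (l.map pvSum).sum := by
  induction l generalizing a with
  | nil => simp
  | cons t ts ih => simp [ih]; ring

lemma inner_foldl (x : List Char) :
    (splitP (· = '+') x).foldl (fun t j => t + (PySem.Int.ofChars? j).getD 0) 0 = pvSum x := by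
  rw [foldl_add_val]; simp [pvSum]

lemma solve_eq_aval (expr : String) : solve expr = pvAval expr.toList := by
  simp only [solve, splitOn_eq_splitP]
  cases h : splitP (· = '-') expr.toList with
  | nil => exact absurd h (splitP_ne_nil _ _)
  | cons s0 rest =>
    have h0 : PySem.List.pyGetD (s0 :: rest) (0 : Int) [] = s0 := by
      simp [PySem.List.pyGetD, PySem.List.pyGet?, PySem.List.pyIdx?]
    rw [h0]
    cases rest with
    | nil =>
      rw [if_neg (by simp)]
      rw [foldl_add_val]
      simp [pvAval, h, pvSum]
    | cons s1 rest' =>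
      rw [if_pos (by simp)]
      rw [foldl_add_val]
      simp only [inner_foldl]
      rw [PySem.List.foldl_pyRange_pyGetD' (s0 :: s1 :: rest') []
        (fun r seg => r - pvSum seg) _ (by norm_num)]
      rw [foldl_sub_sum]
      simp [pvAval, h, pvSum]

lemma solve_alt_eq_aval (expr : String) : solve_alt expr = pvAval expr.toList := by
  have := scan_pos expr.toList 0 [] (by simp)
  simpa [solve_alt, pvFin] using this

-- ===== VERDICT (by name: the statement is the Claim_ definition above) =====
theorem solve_spec : Claim_equal_solve := by
  intro expr _ _
  unfold Spec_solve
  rw [solve_eq_aval, solve_alt_eq_aval]
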